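-- pv_equiv track=rewrite | github.com/keithwebber221/Exam-analysis | exam_item_analysis.py | get_paper_groups
-- ===== SOURCE A (Python) =====
-- def get_paper_groups(columns, paper_weights, paper_map=None):
--     """
--     依 paper_map（試卷行讀取）或 paper_weights 鍵分組題目。
--     paper_map: {題目欄名 -> "P1"/"P2"/...}（load_data 回傳）
--     若無 paper_map 或只有單試卷，全部歸 P1。
--     回傳 dict: {"P1": [col,...], "P2": [...], ...}
--     """
--     groups = {p: [] for p in paper_weights}
--     default_p = list(paper_weights.keys())[0]
--
--     if paper_map and len(paper_weights) > 1:
--         for col in columns: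
--             p = paper_map.get(col, default_p)
--             if p in groups:
--                 groups[p].append(col)
--             else:
--                 groups[default_p].append(col)
--     else:
--         groups[default_p] = list(columns)
--     return groups
-- ===== SOURCE B (Python) =====
-- def get_paper_groups(columns, paper_weights, paper_map=None):
--     # Paper-centric grouping: one filter pass per paper over a fixed resolver,
--     # instead of A's single column loop mutating a dict of lists.
--     cols = list(columns)
--     papers = list(paper_weights)
--     default_p = papers[0]
--     valid = set(papers)
--     if paper_map and len(paper_weights) > 1:
--         def resolve(col):
--             p = paper_map.get(col, default_p)
--             return p if p in valid else default_p
--     else: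
--         def resolve(col):
--             return default_p
--     return {p: [col for col in cols if resolve(col) == p] for p in papers}
-- ===== Notes on version B (the rewrite author's own statement) =====
-- stated objective: alternative
-- what changed: B groups paper-centrically: it builds a column->paper resolver once and produces each paper's list with a filter comprehension per paper, instead of A's single column loop that mutates a dict of lists with in-place appends and a membership branch.
import Mathlib
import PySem

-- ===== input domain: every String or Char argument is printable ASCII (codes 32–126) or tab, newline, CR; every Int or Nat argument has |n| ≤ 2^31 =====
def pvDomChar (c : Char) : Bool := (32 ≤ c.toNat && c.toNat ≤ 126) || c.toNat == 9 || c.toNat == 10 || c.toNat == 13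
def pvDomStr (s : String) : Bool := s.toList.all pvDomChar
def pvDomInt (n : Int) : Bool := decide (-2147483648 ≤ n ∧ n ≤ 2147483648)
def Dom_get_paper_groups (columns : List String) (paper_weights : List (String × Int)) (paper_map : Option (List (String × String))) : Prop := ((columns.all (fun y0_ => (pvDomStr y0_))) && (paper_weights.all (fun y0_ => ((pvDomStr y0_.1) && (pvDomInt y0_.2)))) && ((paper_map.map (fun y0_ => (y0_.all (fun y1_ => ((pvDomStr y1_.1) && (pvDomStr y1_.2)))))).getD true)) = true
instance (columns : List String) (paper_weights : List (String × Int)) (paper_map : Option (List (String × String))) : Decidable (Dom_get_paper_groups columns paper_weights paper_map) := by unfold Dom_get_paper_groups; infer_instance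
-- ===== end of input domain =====

-- B groups paper-centrically (a resolver plus one filter pass per paper) instead of A's
-- single column loop mutating a dict of lists; alternative decomposition, same results.


-- ===== PORT A =====
def get_paper_groups (columns : List String) (paper_weights : List (String × Int)) (paper_map : Option (List (String × String))) : List (String × List String) :=
  -- groups = {p: [] for p in paper_weights}
  let groups0 : PySem.Dict String (List String) :=
    paper_weights.foldl (fun d p => d.insert p.1 []) PySem.Dict.empty
  -- default_p = list(paper_weights.keys())[0]  (IndexError when empty: excluded by Pre_)
  let default_p : String := groups0.keys.headD ""
  let pmd : PySem.Dict String String := PySem.Dict.ofList (paper_map.getD [])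
  if (match paper_map with | none => false | some m => !m.isEmpty) && decide (groups0.size > 1) then
    (columns.foldl (fun d col =>
      let p := pmd.getD col default_p
      if d.contains p then d.modify p [] (· ++ [col])
      else d.modify default_p [] (· ++ [col])) groups0).items
  else
    (groups0.insert default_p columns).items

-- ===== PORT B =====
def get_paper_groups_alt (columns : List String) (paper_weights : List (String × Int)) (paper_map : Option (List (String × String))) : List (String × List String) :=
  let papers : List String := PySem.List.dedup (paper_weights.map Prod.fst)  -- list(paper_weights)
  let default_p : String := papers.headD ""   -- papers[0]; IndexError when empty: excluded by Pre_
  let valid : PySem.Set String := PySem.Set.ofList papers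
  let pmd : PySem.Dict String String := PySem.Dict.ofList (paper_map.getD [])
  let resolve : String → String :=
    if (match paper_map with | none => false | some m => !m.isEmpty) && decide (papers.length > 1) then
      fun col => let p := pmd.getD col default_p
                 if valid.contains p then p else default_p
    else
      fun _ => default_p
  papers.map (fun p => (p, columns.filter (fun col => resolve col == p)))

-- ===== PRECONDITION & SPEC =====
-- Pre_ excludes exactly the empty paper_weights dict, on which A raises IndexError (and B does too).
def Pre_get_paper_groups (columns : List String) (paper_weights : List (String × Int)) (paper_map : Option (List (String × String))) : Prop := paper_weights ≠ []
instance (columns : List String) (paper_weights : List (String × Int)) (paper_map : Option (List (String × String))) : Decidable (Pre_get_paper_groups columns paper_weights paper_map) := by unfold Pre_get_paper_groups; infer_instance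
def pvWitness_get_paper_groups : List String × (List (String × Int)) × (Option (List (String × String))) :=
  (["q1", "q2"], [("P1", 1), ("P2", 2)], some [("q2", "P2")])
def Spec_get_paper_groups (columns : List String) (paper_weights : List (String × Int)) (paper_map : Option (List (String × String))) (out : List (String × List String)) : Prop := out = get_paper_groups_alt columns paper_weights paper_map
instance (columns : List String) (paper_weights : List (String × Int)) (paper_map : Option (List (String × String))) (out : List (String × List String)) : Decidable (Spec_get_paper_groups columns paper_weights paper_map out) := by unfold Spec_get_paper_groups; infer_instance

-- ===== CLAIM (what is proved, stated in full; the proofs are below) =====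
def Claim_equal_get_paper_groups : Prop := ∀ (columns : List String) (paper_weights : List (String × Int)) (paper_map : Option (List (String × String))), Dom_get_paper_groups columns paper_weights paper_map → Pre_get_paper_groups columns paper_weights paper_map → Spec_get_paper_groups columns paper_weights paper_map (get_paper_groups columns paper_weights paper_map)

-- ===== LEMMAS AND PROOFS =====
theorem getD_init_nil (l : List (String × Int)) (d : PySem.Dict String (List String))
    (h : ∀ k, d.getD k ([] : List String) = []) (k : String) :
    (l.foldl (fun d p => d.insert p.1 []) d).getD k [] = [] := by
  induction l generalizing d with
  | nil => exact h k
  | cons p l ih =>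
      simp only [List.foldl_cons]
      exact ih _ (fun k' => by rw [PySem.Dict.getD_insert]; split <;> simp [h])

theorem keys_modify_mem (d : PySem.Dict String (List String)) (k : String) (f : List String → List String)
    (h : k ∈ d.keys) : (d.modify k [] f).keys = d.keys := by
  simp only [PySem.Dict.keys_modify]
  rw [PySem.Dict.keys_insert_of_contains]
  exact (PySem.Dict.contains_iff_mem_keys _ _).2 h

theorem loop_if_eq (columns : List String) (pmd : PySem.Dict String String) (dflt : String)
    (K : List String) (hdflt : dflt ∈ K) :
    ∀ d : PySem.Dict String (List String), d.keys = K →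
    columns.foldl (fun d col =>
        let p := pmd.getD col dflt
        if d.contains p then d.modify p [] (· ++ [col])
        else d.modify dflt [] (· ++ [col])) d
    = columns.foldl (fun d col =>
        d.modify (if pmd.getD col dflt ∈ K then pmd.getD col dflt else dflt) [] (· ++ [col])) d := by
  induction columns with
  | nil => intro d _; rfl
  | cons c cs ih =>
      intro d hK
      simp only [List.foldl_cons]
      have hc : d.contains (pmd.getD c dflt) = decide (pmd.getD c dflt ∈ K) := by
        rw [PySem.Dict.contains_eq_decide_mem_keys, hK]
      by_cases hm : pmd.getD c dflt ∈ K
      · simp only [hc, hm, decide_true, if_true]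
        exact ih _ (by rw [keys_modify_mem _ _ _ (hK ▸ hm), hK])
      · simp only [hc, hm, decide_false, Bool.false_eq_true, if_false]
        exact ih _ (by rw [keys_modify_mem _ _ _ (hK ▸ hdflt), hK])

theorem groupLoop_items (columns : List String) (r : String → String)
    (d : PySem.Dict String (List String)) (hnd : d.keys.Nodup) (hr : ∀ c, r c ∈ d.keys) :
    (columns.foldl (fun d col => d.modify (r col) [] (· ++ [col])) d).items
    = d.keys.map (fun k => (k, d.getD k [] ++ columns.filter (fun c => r c == k))) := by
  have hkeys : (columns.foldl (fun d col => d.modify (r col) [] (· ++ [col])) d).keys = d.keys := by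
    rw [PySem.Dict.keys_foldl_modify_key]
    rw [PySem.Set.update_eq_append_filter]
    have : (PySem.Set.ofList (columns.map r)).filter (fun y => !(PySem.Set.contains d.keys y)) = [] := by
      apply List.filter_eq_nil_iff.2
      intro y hy
      have : y ∈ columns.map r := (PySem.Set.mem_ofList _ _).1 hy
      obtain ⟨c, _, rfl⟩ := List.mem_map.1 this
      simp [hr c]
    rw [this, List.append_nil]
  have hnd' : (columns.foldl (fun d col => d.modify (r col) [] (· ++ [col])) d).keys.Nodup := hkeys ▸ hnd
  rw [PySem.Dict.items_eq_map_keys _ hnd' ([] : List String), hkeys]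
  apply List.map_congr_left
  intro k hk
  have hgd : (columns.foldl (fun d col => d.modify (r col) [] (· ++ [col])) d).getD k []
       = d.getD k [] ++ (((columns.map (fun c => (r c, c))).filter (fun p => p.1 == k)).map (·.2)) := by
    have := PySem.Dict.getD_foldl_modify_append (l := columns.map (fun c => (r c, c))) (d := d) (c := k)
    rw [List.foldl_map] at this
    exact this
  rw [hgd, List.filter_map, List.map_map]
  simp [Function.comp_def]

theorem else_case (columns : List String) (papers : List String) (dflt : String)
    (d : PySem.Dict String (List String)) (hkeys : d.keys = papers) (hnd : papers.Nodup)
    (hdef : dflt ∈ papers) (hz : ∀ k, d.getD k ([] : List String) = []) :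
    (d.insert dflt columns).items
    = papers.map (fun p => (p, columns.filter (fun _ => dflt == p))) := by
  have hcont : d.contains dflt = true := by
    rw [PySem.Dict.contains_eq_decide_mem_keys, hkeys]; simpa using hdef
  rw [PySem.Dict.items_insert_of_contains _ columns hcont]
  rw [PySem.Dict.items_eq_map_keys _ (hkeys ▸ hnd) ([] : List String), hkeys, List.map_map]
  apply List.map_congr_left
  intro k hk
  by_cases h : k = dflt
  · subst h; simp [hz]
  · have hbk : (dflt == k) = false := by simp [Ne.symm h]
    simp [hz, h, hbk]

theorem loop_case (columns : List String) (papers : List String) (dflt : String)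
    (pmd : PySem.Dict String String) (d : PySem.Dict String (List String))
    (hkeys : d.keys = papers) (hnd : papers.Nodup) (hdef : dflt ∈ papers)
    (hz : ∀ k, d.getD k ([] : List String) = []) :
    (columns.foldl (fun d col =>
        if d.contains (pmd.getD col dflt) then
          d.modify (pmd.getD col dflt) [] (· ++ [col])
        else d.modify dflt [] (· ++ [col])) d).items
    = papers.map (fun p => (p, columns.filter (fun col =>
        (if PySem.Set.contains papers (pmd.getD col dflt) then pmd.getD col dflt else dflt) == p))) := by
  rw [loop_if_eq columns pmd dflt papers hdef d hkeys]
  rw [groupLoop_items columns _ _ (hkeys ▸ hnd)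
      (by intro c; rw [hkeys]
          by_cases h : pmd.getD c dflt ∈ papers
          · rw [if_pos h]; exact h
          · rw [if_neg h]; exact hdef)]
  rw [hkeys]
  apply List.map_congr_left
  intro k hk
  rw [hz k, List.nil_append]
  congr 1
  apply List.filter_congr
  intro c _
  have hPQ : (PySem.Set.contains papers (pmd.getD c dflt) = true)
      = (pmd.getD c dflt ∈ papers) := by
    rw [eq_iff_iff]; exact PySem.Set.contains_iff _ _
  simp only [hPQ]


-- ===== VERDICT (by name: the statement is the Claim_ definition above) =====
theorem get_paper_groups_spec : Claim_equal_get_paper_groups := by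
  intro columns pw pm _ hpre
  unfold Spec_get_paper_groups
  unfold Pre_get_paper_groups at hpre
  unfold get_paper_groups get_paper_groups_alt
  dsimp only
  have hkeys : (pw.foldl (fun d p => d.insert p.1 ([] : List String)) PySem.Dict.empty).keys
      = PySem.List.dedup (pw.map Prod.fst) := by
    rw [PySem.Dict.keys_foldl_insert_key]
    simp [PySem.Set.update_nil_left]
  have hndp : (PySem.List.dedup (pw.map Prod.fst)).Nodup := PySem.List.nodup_dedup _
  have hnep : PySem.List.dedup (pw.map Prod.fst) ≠ [] := by
    cases pw with
    | nil => exact absurd rfl hpre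
    | cons q t =>
        have : q.1 ∈ PySem.List.dedup ((q :: t).map Prod.fst) :=
          (PySem.List.mem_dedup _ _).2 (by simp)
        exact List.ne_nil_of_mem this
  have hdef : (PySem.List.dedup (pw.map Prod.fst)).headD "" ∈ PySem.List.dedup (pw.map Prod.fst) := by
    cases h : PySem.List.dedup (pw.map Prod.fst) with
    | nil => exact absurd h hnep
    | cons a t => simp
  have hz : ∀ k, (pw.foldl (fun d p => d.insert p.1 ([] : List String)) PySem.Dict.empty).getD k [] = [] :=
    fun k => getD_init_nil pw _ (fun _ => PySem.Dict.getD_empty _ _) k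
  have hsize : (pw.foldl (fun d p => d.insert p.1 ([] : List String)) PySem.Dict.empty).size
      = (PySem.List.dedup (pw.map Prod.fst)).length := by
    have h2 : (pw.foldl (fun d p => d.insert p.1 ([] : List String)) PySem.Dict.empty).keys.length
        = (PySem.List.dedup (pw.map Prod.fst)).length := by rw [hkeys]
    simpa [PySem.Dict.keys, PySem.Dict.size] using h2
  rw [hkeys, hsize, PySem.Set.ofList_eq_self_of_nodup _ hndp]
  cases pm with
  | none =>
      simp only [Option.getD_none, Bool.false_and, Bool.false_eq_true, if_false]
      exact else_case columns _ _ _ hkeys hndp hdef hz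
  | some m =>
      by_cases hb : (!m.isEmpty && decide ((PySem.List.dedup (pw.map Prod.fst)).length > 1)) = true
      · simp only [Option.getD_some, hb, if_true]
        exact loop_case columns _ _ (PySem.Dict.ofList m) _ hkeys hndp hdef hz
      · simp only [Option.getD_some, hb]
        exact else_case columns _ _ _ hkeys hndp hdef hz
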